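-- pv_equiv track=rewrite | github.com/viniciusvturismo/orlando-assistant | src/language/response_generator.py | _enforce_limits
-- ===== SOURCE A (Python) =====
-- MAX_CHARS = 480               # limite máximo da mensagem final
--
-- def _enforce_limits(text: str) -> str:
--     """Garante que a mensagem respeita os limites de tamanho."""
--     if len(text) <= MAX_CHARS:
--         return text
--
--     # Trunca na última linha que cabe
--     lines = text.split("\n")
--     result = []
--     total = 0
--     for line in lines:
--         if total + len(line) + 1 > MAX_CHARS:
--             break
--         result.append(line)
--         total += len(line) + 1
--
--     return "\n".join(result).rstrip()
-- ===== SOURCE B (Python) =====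
-- MAX_CHARS = 480               # limite máximo da mensagem final
--
-- def _enforce_limits(text: str) -> str:
--     """Garante que a mensagem respeita os limites de tamanho."""
--     if len(text) <= MAX_CHARS:
--         return text
--     # Last newline that starts within the first MAX_CHARS characters marks
--     # the end of the last whole line that fits (each kept line costs len+1).
--     cut = text.rfind("\n", 0, MAX_CHARS)
--     return text[:cut].rstrip() if cut != -1 else ""
-- ===== Notes on version B (the rewrite author's own statement) =====
-- stated objective: alternative
-- what changed: Instead of splitting the whole text into lines and re-joining an incrementally accumulated prefix of them under a running size budget, B locates the last newline that starts within the first MAX_CHARS characters with one bounded rfind and returns that slice rstripped.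
import Mathlib
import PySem

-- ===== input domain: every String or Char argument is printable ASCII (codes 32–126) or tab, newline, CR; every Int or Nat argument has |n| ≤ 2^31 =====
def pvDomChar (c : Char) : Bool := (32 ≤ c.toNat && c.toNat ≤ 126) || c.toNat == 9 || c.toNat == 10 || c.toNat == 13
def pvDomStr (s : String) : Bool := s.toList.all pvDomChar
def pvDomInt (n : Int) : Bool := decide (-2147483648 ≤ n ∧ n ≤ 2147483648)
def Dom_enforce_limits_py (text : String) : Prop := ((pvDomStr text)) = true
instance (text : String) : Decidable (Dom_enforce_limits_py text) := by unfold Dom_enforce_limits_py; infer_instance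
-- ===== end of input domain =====

-- B replaces A's split / accumulate-with-break / join truncation by a single rfind of the
-- last newline starting within the first MAX_CHARS characters, then one slice + rstrip.

-- ===== PORT A =====
def MAX_CHARS_py : Int := 480

-- the 'for line in lines: … break' loop of A, with its running total
def enforceLoopA : List (List Char) → Int → List (List Char)
  | [], _ => []
  | line :: rest, total =>
      if total + line.length + 1 > MAX_CHARS_py then []
      else line :: enforceLoopA rest (total + line.length + 1)

def enforce_limits_py (text : String) : String :=
  if PySem.Str.len text ≤ MAX_CHARS_py then text
  else
    let lines := PySem.Chars.splitOn text.toList ['\n']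
    String.ofList (PySem.Chars.rstrip (PySem.Chars.join ['\n'] (enforceLoopA lines 0)))

-- ===== PORT B =====
def enforce_limits_py_alt (text : String) : String :=
  if PySem.Str.len text ≤ MAX_CHARS_py then text
  else
    let cut := PySem.Str.rfindFrom text "\n" 0 (some MAX_CHARS_py)
    if cut ≠ -1 then String.ofList (PySem.Chars.rstrip (PySem.List.slice text.toList none (some cut)))
    else ""

-- ===== PRECONDITION & SPEC =====
def Spec_enforce_limits_py (text : String) (out : String) : Prop := out = enforce_limits_py_alt text
instance (text : String) (out : String) : Decidable (Spec_enforce_limits_py text out) := by unfold Spec_enforce_limits_py; infer_instance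

-- ===== CLAIM (what is proved, stated in full; the proofs are below) =====
def Claim_equal_enforce_limits_py : Prop := ∀ (text : String), Dom_enforce_limits_py text → Spec_enforce_limits_py text (enforce_limits_py text)

-- ===== LEMMAS AND PROOFS =====

-- index (< m) of the LAST newline of cs, if any — proof-side characterisation of rfind
def lastNL? (cs : List Char) : Nat → Option Nat
  | 0 => none
  | m + 1 => if cs[m]? = some '\n' then some m else lastNL? cs m

-- A's loop, re-indexed by the remaining budget
def loopB : List (List Char) → Int → List (List Char)
  | [], _ => []
  | line :: rest, M =>
      if (line.length : Int) + 1 > M then []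
      else line :: loopB rest (M - (line.length + 1))

-- simple structural splitter (proof-side view of PySem.Chars.splitOn on a 1-char sep)
def mySplit : List Char → List (List Char)
  | [] => [[]]
  | c :: rest => if c = '\n' then [] :: mySplit rest else (mySplit rest).modifyHead (c :: ·)

theorem loopA_eq_loopB (ls : List (List Char)) : ∀ total : Int,
    enforceLoopA ls total = loopB ls (MAX_CHARS_py - total) := by
  induction ls with
  | nil => intro t; rfl
  | cons l rest ih =>
    intro t
    simp only [enforceLoopA, loopB, MAX_CHARS_py]
    have hiff : ((480:Int) < t + (l.length : Int) + 1) ↔ ((l.length : Int) + 1 > (480:Int) - t) := by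
      omega
    by_cases h : (l.length : Int) + 1 > (480:Int) - t
    · rw [if_pos (hiff.mpr h), if_pos h]
    · rw [if_neg (fun hh => h (hiff.mp hh)), if_neg h, ih]
      simp only [MAX_CHARS_py]
      have : (480:Int) - t - ((l.length:Int) + 1) = 480 - (t + (l.length:Int) + 1) := by omega
      rw [this]

theorem splitOn_go_eq : ∀ (fuel : Nat) (l cur : List Char) (acc : List (List Char)),
    l.length < fuel →
    PySem.Chars.splitOn.go ['\n'] fuel l cur acc
      = acc.reverse ++ (mySplit l).modifyHead (cur.reverse ++ ·) := by
  intro fuel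
  induction fuel with
  | zero => intro l cur acc h; omega
  | succ f ih =>
    intro l cur acc h
    cases l with
    | nil => simp [PySem.Chars.splitOn.go, mySplit]
    | cons c rest =>
      show (if List.isPrefixOf ['\n'] (c :: rest) then
              PySem.Chars.splitOn.go ['\n'] f (List.drop (List.length ['\n']) (c::rest)) [] (cur.reverse :: acc)
            else PySem.Chars.splitOn.go ['\n'] f rest (c :: cur) acc) = _
      have hlen : rest.length < f := by simpa using Nat.lt_of_succ_lt_succ h
      have hp : List.isPrefixOf ['\n'] (c :: rest) = (c == '\n') := by
        simp [List.isPrefixOf]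
        exact eq_comm
      rw [hp]
      by_cases hc : c = '\n'
      · subst hc
        rw [if_pos (by simp)]
        have hd : List.drop (List.length ['\n']) ('\n' :: rest) = rest := rfl
        rw [hd, ih rest [] (cur.reverse :: acc) hlen]
        simp [mySplit]
        cases mySplit rest <;> simp
      · rw [if_neg (by simpa using hc), ih rest (c :: cur) acc hlen]
        simp only [mySplit, if_neg hc]
        cases mySplit rest <;> simp

theorem splitOn_eq_mySplit (cs : List Char) :
    PySem.Chars.splitOn cs ['\n'] = mySplit cs := by
  show PySem.Chars.splitOn.go ['\n'] (cs.length + 1) cs [] [] = _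
  rw [splitOn_go_eq (cs.length + 1) cs [] [] (by omega)]
  cases mySplit cs <;> simp

theorem mySplit_no_nl (cs : List Char) (h : '\n' ∉ cs) : mySplit cs = [cs] := by
  induction cs with
  | nil => rfl
  | cons c rest ih =>
    simp only [List.mem_cons, not_or] at h
    simp [mySplit, Ne.symm h.1, ih h.2]

theorem mySplit_append (pre rest : List Char) (h : '\n' ∉ pre) :
    mySplit (pre ++ '\n' :: rest) = pre :: mySplit rest := by
  induction pre with
  | nil => simp [mySplit]
  | cons c p ih =>
    simp only [List.mem_cons, not_or] at h
    simp [mySplit, Ne.symm h.1, ih h.2]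

theorem lastNL?_some (cs : List Char) : ∀ m p, lastNL? cs m = some p → cs[p]? = some '\n' ∧ p < m := by
  intro m
  induction m with
  | zero => intro p h; simp [lastNL?] at h
  | succ m ih =>
    intro p h
    simp only [lastNL?] at h
    split at h
    · cases h; exact ⟨by assumption, by omega⟩
    · have := ih p h; exact ⟨this.1, by omega⟩

theorem lastNL?_none_iff (cs : List Char) (m : Nat) :
    lastNL? cs m = none ↔ ∀ p < m, cs[p]? ≠ some '\n' := by
  induction m with
  | zero => simp [lastNL?]
  | succ m ih =>
    simp only [lastNL?]
    split
    · simp only [reduceCtorEq, false_iff]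
      push Not
      exact ⟨m, by omega, by assumption⟩
    · rw [ih]
      constructor
      · intro h p hp
        by_cases hpm : p = m
        · subst hpm; assumption
        · exact h p (by omega)
      · intro h p hp; exact h p (by omega)

theorem lastNL?_shift' (pre rest : List Char) : ∀ k : Nat,
    lastNL? (pre ++ '\n' :: rest) (pre.length + 1 + k)
      = match lastNL? rest k with
        | some p' => some (pre.length + 1 + p')
        | none => some pre.length := by
  intro k
  induction k with
  | zero =>
    simp only [lastNL?]
    rw [List.getElem?_append_right (by omega)]
    simp
  | succ k ih =>
    have : pre.length + 1 + (k + 1) = (pre.length + 1 + k) + 1 := by omega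
    rw [this]
    simp only [lastNL?]
    rw [List.getElem?_append_right (by omega)]
    have h2 : pre.length + 1 + k - pre.length = k + 1 := by omega
    rw [h2]
    simp only [List.getElem?_cons_succ]
    split
    · rfl
    · exact ih

theorem lastNL?_shift (pre rest : List Char) (m : Nat) (hm : pre.length < m) :
    lastNL? (pre ++ '\n' :: rest) m
      = match lastNL? rest (m - pre.length - 1) with
        | some p' => some (pre.length + 1 + p')
        | none => some pre.length := by
  obtain ⟨k, rfl⟩ : ∃ k, m = pre.length + 1 + k := ⟨m - pre.length - 1, by omega⟩
  have hk : pre.length + 1 + k - pre.length - 1 = k := by omega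
  rw [hk, lastNL?_shift' pre rest]

theorem lastNL?_small (pre rest : List Char) (h : '\n' ∉ pre) (m : Nat) (hm : m ≤ pre.length) :
    lastNL? (pre ++ '\n' :: rest) m = none := by
  rw [lastNL?_none_iff]
  intro p hp hc
  rw [List.getElem?_append_left (by omega)] at hc
  exact h (List.mem_of_getElem? hc)

theorem isPrefixOf_nl (u : List Char) : List.isPrefixOf ['\n'] u = (u[0]? == some '\n') := by
  cases u with
  | nil => rfl
  | cons c v =>
    simp [List.isPrefixOf]
    exact eq_comm

theorem rfind_go_eq (s : List Char) : ∀ j : Nat,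
    PySem.Chars.rfind.go s ['\n'] j
      = match lastNL? s (j + 1) with
        | none => -1
        | some p => (p : Int) := by
  intro j
  induction j with
  | zero =>
    show (if List.isPrefixOf ['\n'] s then (0:Int) else -1) = _
    rw [isPrefixOf_nl]
    simp only [lastNL?]
    by_cases h : s[0]? = some '\n'
    · simp [h]
    · simp [h]
  | succ j ih =>
    show (if List.isPrefixOf ['\n'] (s.drop (j+1)) then ((j:Int)+1) else PySem.Chars.rfind.go s ['\n'] j) = _
    rw [isPrefixOf_nl, ih]
    have hd : (s.drop (j+1))[0]? = s[j+1]? := by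
      rw [List.getElem?_drop]
    rw [hd]
    show _ = (match lastNL? s (j + 1 + 1) with | none => (-1:Int) | some p => (p : Int))
    simp only [lastNL?]
    by_cases h : s[j+1]? = some '\n'
    · simp [h]
    · simp [h]

theorem lastNL?_take (cs : List Char) (k : Nat) : ∀ m : Nat, m ≤ k →
    lastNL? (cs.take k) m = lastNL? cs m := by
  intro m
  induction m with
  | zero => intro _; rfl
  | succ m ih =>
    intro hm
    simp only [lastNL?]
    rw [List.getElem?_take_of_lt (by omega), ih (by omega)]

theorem lastNL?_stable (s : List Char) (m : Nat) (h : s.length ≤ m) :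
    lastNL? s (m + 1) = lastNL? s m := by
  simp only [lastNL?]
  rw [List.getElem?_eq_none (by omega)]
  simp

theorem first_nl_decomp (cs : List Char) (h : '\n' ∈ cs) :
    ∃ pre rest, '\n' ∉ pre ∧ cs = pre ++ '\n' :: rest := by
  induction cs with
  | nil => cases h
  | cons c cs' ih =>
    by_cases hc : c = '\n'
    · exact ⟨[], cs', by simp, by rw [hc]; rfl⟩
    · have h' : '\n' ∈ cs' := by
        cases List.mem_cons.mp h with
        | inl he => exact absurd he.symm hc
        | inr hm => exact hm
      obtain ⟨pre, rest, hp, he⟩ := ih h'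
      exact ⟨c :: pre, rest, by simp [hp, Ne.symm hc], by simp [he]⟩

theorem main_bridge : ∀ (n : Nat) (cs : List Char) (m : Nat), cs.length ≤ n → cs.length + 1 > m →
    (lastNL? cs m = none → loopB (mySplit cs) (m : Int) = []) ∧
    (∀ p, lastNL? cs m = some p →
      loopB (mySplit cs) (m : Int) ≠ [] ∧
      PySem.Chars.join ['\n'] (loopB (mySplit cs) (m : Int)) = cs.take p) := by
  intro n
  induction n with
  | zero =>
    intro cs m hn hm
    have hcs : cs = [] := List.eq_nil_of_length_eq_zero (by omega)
    subst hcs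
    constructor
    · intro _
      simp only [mySplit, loopB]
      rw [if_pos (by omega)]
    · intro p hp
      have := (lastNL?_some [] m p hp).1
      simp at this
  | succ n ih =>
    intro cs m hn hm
    by_cases hmem : '\n' ∈ cs
    · obtain ⟨pre, rest, hpre, rfl⟩ := first_nl_decomp cs hmem
      rw [mySplit_append pre rest hpre]
      have hlen : (pre ++ '\n' :: rest).length = pre.length + 1 + rest.length := by simp; omega
      by_cases hfit : (pre.length : Int) + 1 > (m : Int)
      · -- first line does not fit: loop empty, and no newline below m
        have hml : m ≤ pre.length := by omega
        constructor
        · intro _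
          simp only [loopB]
          rw [if_pos hfit]
        · intro p hp
          rw [lastNL?_small pre rest hpre m hml] at hp
          cases hp
      · have hml : pre.length < m := by omega
        set m' : Nat := m - pre.length - 1 with hm'
        have hcast : (m : Int) - ((pre.length : Int) + 1) = (m' : Int) := by omega
        have hrest : rest.length ≤ n := by omega
        have hrm : rest.length + 1 > m' := by omega
        obtain ⟨Hnone, Hsome⟩ := ih rest m' hrest hrm
        have hloop : loopB (pre :: mySplit rest) (m : Int)
            = pre :: loopB (mySplit rest) (m' : Int) := by
          simp only [loopB]
          rw [if_neg hfit, hcast]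
        rw [hloop]
        constructor
        · intro h0
          rw [lastNL?_shift pre rest m hml] at h0
          cases hL : lastNL? rest m' <;> rw [hL] at h0 <;> cases h0
        · intro p hp
          rw [lastNL?_shift pre rest m hml] at hp
          refine ⟨by simp, ?_⟩
          cases hL : lastNL? rest m' with
          | none =>
            rw [hL] at hp
            cases hp
            rw [Hnone hL]
            show PySem.Chars.join ['\n'] [pre] = _
            rw [PySem.Chars.join_singleton]
            rw [List.take_left]
          | some p' =>
            rw [hL] at hp
            cases hp
            obtain ⟨hne, hjoin⟩ := Hsome p' hL
            cases hLL : loopB (mySplit rest) (m' : Int) with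
            | nil => exact absurd hLL hne
            | cons l2 t2 =>
              rw [hLL] at hjoin
              rw [PySem.Chars.join_cons_cons, hjoin]
              have : pre.length + 1 + p' = pre.length + (1 + p') := by omega
              rw [this, List.take_append, List.take_cons (by omega)]
              simp
    · rw [mySplit_no_nl cs hmem]
      constructor
      · intro _
        simp only [loopB]
        rw [if_pos (by omega)]
      · intro p hp
        have := (lastNL?_some cs m p hp).1
        exact absurd (List.mem_of_getElem? this) hmem

theorem rfindFrom_480 (cs : List Char) (h : 480 < cs.length) :
    PySem.Chars.rfindFrom cs ['\n'] 0 (some 480)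
      = match lastNL? cs 480 with
        | none => -1
        | some p => (p : Int) := by
  unfold PySem.Chars.rfindFrom
  simp only
  rw [if_neg (show ¬((cs.length : Int) < 480) by omega)]
  rw [if_neg (show ¬((480:Int) < 0) by norm_num)]
  rw [if_neg (show ¬((0:Int) < 0) by norm_num)]
  rw [if_neg (show ¬((480:Int) < 0) by norm_num)]
  have ht : ((480:Int)).toNat = 480 := rfl
  have h0 : ((0:Int)).toNat = 0 := rfl
  rw [ht, h0, List.drop_zero]
  have hrf : PySem.Chars.rfind (cs.take 480) ['\n']
      = PySem.Chars.rfind.go (cs.take 480) ['\n'] (cs.take 480).length := rfl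
  have hlen : (cs.take 480).length = 480 := by
    rw [List.length_take]
    omega
  rw [hrf, hlen, rfind_go_eq]
  rw [lastNL?_stable (cs.take 480) 480 (by omega), lastNL?_take cs 480 480 (by omega)]
  cases hN : lastNL? cs 480 with
  | none => simp
  | some p =>
    simp only
    rw [if_neg (show ¬((p:Int) = -1) by omega), zero_add]

theorem final_eq (text : String) : enforce_limits_py text = enforce_limits_py_alt text := by
  unfold enforce_limits_py enforce_limits_py_alt
  by_cases hlen : PySem.Str.len text ≤ MAX_CHARS_py
  · rw [if_pos hlen, if_pos hlen]
  · rw [if_neg hlen, if_neg hlen]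
    simp only
    have hbig : 480 < text.toList.length := by
      rw [PySem.Str.len_eq] at hlen
      simp only [MAX_CHARS_py] at hlen
      omega
    have hr : PySem.Str.rfindFrom text "\n" 0 (some MAX_CHARS_py)
        = match lastNL? text.toList 480 with | none => -1 | some p => (p : Int) := by
      rw [PySem.Str.rfindFrom_eq]
      exact rfindFrom_480 text.toList hbig
    rw [splitOn_eq_mySplit, loopA_eq_loopB]
    have h480 : MAX_CHARS_py - 0 = ((480 : Nat) : Int) := by simp [MAX_CHARS_py]
    rw [h480]
    obtain ⟨Hnone, Hsome⟩ := main_bridge text.toList.length text.toList 480 le_rfl (by omega)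
    cases hN : lastNL? text.toList 480 with
    | none =>
      rw [Hnone hN, hr, hN]
      simp only
      rw [if_neg (by simp)]
      rfl
    | some p =>
      obtain ⟨hne, hjoin⟩ := Hsome p hN
      rw [hjoin, hr, hN]
      simp only
      rw [if_pos (show ((p : Int) ≠ -1) by omega)]
      rw [PySem.List.slice_to _ (Int.natCast_nonneg p)]
      rw [Int.toNat_natCast]

-- ===== VERDICT (by name: the statement is the Claim_ definition above) =====
theorem enforce_limits_py_spec : Claim_equal_enforce_limits_py := by
  intro text _
  unfold Spec_enforce_limits_py
  exact final_eq text
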